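-- pv_equiv track=rewrite | github.com/mattlarkin8/pop_fly | scripts/update_pr_checklist.py | build_checklist
-- ===== SOURCE A (Python) =====
-- from typing import List, Optional
--
-- def build_checklist(tasks: List[str], commit_messages: List[str]) -> str:
--     done = set()
--     lower_msgs = [m.lower() for m in commit_messages]
--     for idx, task in enumerate(tasks, start=1):
--         key = task.lower()
--         tag = f"#{idx}"
--         for msg in lower_msgs:
--             if key in msg or tag in msg:
--                 done.add(idx)
--                 break
--     lines = ["## Implementation Tasks"]
--     for idx, task in enumerate(tasks, start=1):
--         mark = "[x]" if idx in done else "[ ]"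
--         lines.append(f"- {mark} {task}")
--     return "\n".join(lines)
-- ===== SOURCE B (Python) =====
-- def build_checklist(tasks, commit_messages):
--     # Multi-pattern matching by window hashing: build one dict mapping each
--     # pattern (lowercased task text or "#<idx>" tag) to the task indices it
--     # marks, then for each message check every window whose length occurs
--     # among the patterns against the dict -- no per-task substring scans.
--     pairs = []
--     for i, t in enumerate(tasks, 1):
--         pairs.append((t.lower(), i))
--         pairs.append(("#%d" % i, i))
--     index = {}
--     for pat, i in pairs:
--         index.setdefault(pat, []).append(i)
--     lengths = sorted({len(pat) for pat in index})
--     done = set()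
--     for m in commit_messages:
--         msg = m.lower()
--         for L in lengths:
--             if L <= len(msg):
--                 for p in range(len(msg) - L + 1):
--                     hits = index.get(msg[p:p + L])
--                     if hits:
--                         done.update(hits)
--     lines = ["## Implementation Tasks"] + \
--         ["- %s %s" % ("[x]" if i in done else "[ ]", t)
--          for i, t in enumerate(tasks, 1)]
--     return "\n".join(lines)
-- ===== Notes on version B (the rewrite author's own statement) =====
-- stated objective: alternative
-- what changed: B replaces A's per-task substring scans over every message by window hashing: it builds one dict mapping each pattern (lowercased task text or '#idx' tag) to the task indices it marks plus the sorted set of pattern lengths, then for each message looks up every window of each occurring length in the dict, so no per-task 'in' scan remains.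
import Mathlib
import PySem

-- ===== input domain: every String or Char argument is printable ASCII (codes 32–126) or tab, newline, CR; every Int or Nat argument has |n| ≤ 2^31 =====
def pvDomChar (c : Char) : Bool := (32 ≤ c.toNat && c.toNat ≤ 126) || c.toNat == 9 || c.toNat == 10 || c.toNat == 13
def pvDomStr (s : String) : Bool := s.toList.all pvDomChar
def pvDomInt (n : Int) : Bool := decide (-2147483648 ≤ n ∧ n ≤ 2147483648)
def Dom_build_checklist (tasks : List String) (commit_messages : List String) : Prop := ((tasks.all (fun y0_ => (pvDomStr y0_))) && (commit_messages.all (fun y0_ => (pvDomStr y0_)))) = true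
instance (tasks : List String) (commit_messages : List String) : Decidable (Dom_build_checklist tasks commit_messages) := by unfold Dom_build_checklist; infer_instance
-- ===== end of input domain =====

-- B replaces A's per-task substring scans by window hashing: one dict from each
-- pattern (lowered task text / "#idx" tag) to the indices it marks, then every
-- window of each message whose length occurs among the patterns is looked up;
-- alternative algorithm, same result.


-- ===== PORT A =====
-- inner 'for msg in lower_msgs: … break' loop of A
def pvInnerA (key tag : String) (msgs : List String) : Bool :=
  match msgs with
  | [] => false
  | m :: rest =>
      if PySem.Str.isIn key m || PySem.Str.isIn tag m then true
      else pvInnerA key tag rest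

def build_checklist (tasks : List String) (commit_messages : List String) : String :=
  let lower_msgs := commit_messages.map PySem.Str.lower
  let done : PySem.Set Int :=
    (PySem.List.enumerate tasks 1).foldl (fun done p =>
      let key := PySem.Str.lower p.2
      let tag := "#" ++ PySem.Int.toStr p.1
      if pvInnerA key tag lower_msgs then PySem.Set.add done p.1 else done)
      PySem.Set.empty
  let lines :=
    (PySem.List.enumerate tasks 1).foldl (fun lines p =>
      lines ++ ["- " ++ (if PySem.Set.contains done p.1 then "[x]" else "[ ]") ++ " " ++ p.2])
      ["## Implementation Tasks"]
  PySem.Str.join "\n" lines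

-- ===== PORT B =====
-- the 'pairs' list: (pattern, index) for each task's lowered text and "#idx" tag
def pvPairsB (tasks : List String) : List (String × Int) :=
  (PySem.List.enumerate tasks 1).foldl
    (fun acc p => (acc ++ [(PySem.Str.lower p.2, p.1)]) ++ [("#" ++ PySem.Int.toStr p.1, p.1)]) []

-- the 'index' dict: pattern -> list of task indices (setdefault(...).append)
def pvIndexB (tasks : List String) : PySem.Dict String (List Int) :=
  (pvPairsB tasks).foldl (fun d q => d.modify q.1 [] (· ++ [q.2])) PySem.Dict.empty

-- lengths = sorted({len(pat) for pat in index})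
def pvLengthsB (tasks : List String) : List Int :=
  PySem.List.sorted (PySem.Set.ofList (((pvIndexB tasks).keys).map PySem.Str.len)) (fun x => x) false

-- the triple loop filling 'done' by dictionary lookups of message windows
def pvDoneB (tasks : List String) (commit_messages : List String) : PySem.Set Int :=
  commit_messages.foldl (fun done m =>
    let msg := PySem.Str.lower m
    (pvLengthsB tasks).foldl (fun done L =>
      if L ≤ PySem.Str.len msg then
        (PySem.List.pyRange 0 (PySem.Str.len msg - L + 1)).foldl (fun done p =>
          PySem.Set.update done ((pvIndexB tasks).getD (PySem.Str.slice msg (some p) (some (p + L))) [])) done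
      else done) done) PySem.Set.empty

def build_checklist_alt (tasks : List String) (commit_messages : List String) : String :=
  let done := pvDoneB tasks commit_messages
  let lines := ["## Implementation Tasks"] ++
    (PySem.List.enumerate tasks 1).map (fun p =>
      "- " ++ (if PySem.Set.contains done p.1 then "[x]" else "[ ]") ++ " " ++ p.2)
  PySem.Str.join "\n" lines

-- ===== PRECONDITION & SPEC =====
def Spec_build_checklist (tasks : List String) (commit_messages : List String) (out : String) : Prop := out = build_checklist_alt tasks commit_messages
instance (tasks : List String) (commit_messages : List String) (out : String) : Decidable (Spec_build_checklist tasks commit_messages out) := by unfold Spec_build_checklist; infer_instance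

-- ===== CLAIM (what is proved, stated in full; the proofs are below) =====
def Claim_equal_build_checklist : Prop := ∀ (tasks : List String) (commit_messages : List String), Dom_build_checklist tasks commit_messages → Spec_build_checklist tasks commit_messages (build_checklist tasks commit_messages)

-- ===== LEMMAS AND PROOFS =====

theorem pvInnerA_eq_any (key tag : String) (msgs : List String) :
    pvInnerA key tag msgs = msgs.any (fun m => PySem.Str.isIn key m || PySem.Str.isIn tag m) := by
  induction msgs with
  | nil => rfl
  | cons m rest ih =>
      simp only [pvInnerA, List.any_cons]
      split_ifs with h
      · rw [h, Bool.true_or]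
      · simp only [Bool.not_eq_true] at h
        rw [h, Bool.false_or, ih]

theorem pvFoldAdd_mem (c : Int × String → Bool) (l : List (Int × String)) (s : PySem.Set Int) (x : Int) :
    x ∈ l.foldl (fun s p => if c p then PySem.Set.add s p.1 else s) s ↔
      x ∈ s ∨ ∃ p ∈ l, c p = true ∧ x = p.1 := by
  induction l generalizing s with
  | nil => simp
  | cons p rest ih =>
      simp only [List.foldl_cons]
      split_ifs with hc
      · rw [ih]
        simp only [PySem.Set.mem_add, List.mem_cons]
        constructor
        · rintro (⟨hs | hx⟩ | ⟨q, hq, hcq, hxq⟩)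
          · exact Or.inl hs
          · exact Or.inr ⟨p, Or.inl rfl, hc, hx⟩
          · exact Or.inr ⟨q, Or.inr hq, hcq, hxq⟩
        · rintro (hs | ⟨q, (rfl | hq), hcq, hxq⟩)
          · exact Or.inl (Or.inl hs)
          · exact Or.inl (Or.inr hxq)
          · exact Or.inr ⟨q, hq, hcq, hxq⟩
      · rw [ih]
        simp only [List.mem_cons]
        constructor
        · rintro (hs | ⟨q, hq, hcq, hxq⟩)
          · exact Or.inl hs
          · exact Or.inr ⟨q, Or.inr hq, hcq, hxq⟩
        · rintro (hs | ⟨q, (rfl | hq), hcq, hxq⟩)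
          · exact Or.inl hs
          · exact absurd hcq (by simp [hc])
          · exact Or.inr ⟨q, hq, hcq, hxq⟩

-- generic membership shape for an accumulating set fold
theorem pvMemFoldGen {β : Type} (g : PySem.Set Int → β → PySem.Set Int) (P : β → Int → Prop)
    (hg : ∀ s b x, x ∈ g s b ↔ x ∈ s ∨ P b x) (l : List β) (s : PySem.Set Int) (x : Int) :
    x ∈ l.foldl g s ↔ x ∈ s ∨ ∃ b ∈ l, P b x := by
  induction l generalizing s with
  | nil => simp
  | cons b rest ih =>
      simp only [List.foldl_cons, ih, hg, List.mem_cons]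
      constructor
      · rintro ((hs | hp) | ⟨b', hb', hp'⟩)
        · exact Or.inl hs
        · exact Or.inr ⟨b, Or.inl rfl, hp⟩
        · exact Or.inr ⟨b', Or.inr hb', hp'⟩
      · rintro (hs | ⟨b', (rfl | hb'), hp'⟩)
        · exact Or.inl (Or.inl hs)
        · exact Or.inl (Or.inr hp')
        · exact Or.inr ⟨b', hb', hp'⟩

theorem pvMemPairsB (tasks : List String) (q : String × Int) :
    q ∈ pvPairsB tasks ↔ ∃ k, ∃ _ : k < tasks.length,
      q = (PySem.Str.lower tasks[k], 1 + (k : Int)) ∨ q = ("#" ++ PySem.Int.toStr (1 + (k : Int)), 1 + (k : Int)) := by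
  unfold pvPairsB
  rw [PySem.List.foldl_congr_mem _ _
        (fun acc p => acc ++ [(PySem.Str.lower p.2, p.1), ("#" ++ PySem.Int.toStr p.1, p.1)]) _
        (by intro acc x _; simp)]
  rw [PySem.List.foldl_append_eq_flatMap]
  simp only [List.nil_append, List.mem_flatMap, List.mem_cons, List.not_mem_nil, or_false]
  constructor
  · rintro ⟨p, hp, hq⟩
    obtain ⟨k, hk, rfl⟩ := (PySem.List.mem_enumerate_iff _ _ _).mp hp
    exact ⟨k, hk, hq⟩
  · rintro ⟨k, hk, hq⟩
    exact ⟨(1 + (k : Int), tasks[k]), (PySem.List.mem_enumerate_iff _ _ _).mpr ⟨k, hk, rfl⟩, hq⟩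

theorem pvMemIndexB (tasks : List String) (w : String) (i : Int) :
    i ∈ (pvIndexB tasks).getD w [] ↔ ∃ q ∈ pvPairsB tasks, q.1 = w ∧ q.2 = i := by
  unfold pvIndexB
  rw [PySem.Dict.getD_foldl_modify_append]
  simp only [PySem.Dict.getD_empty, List.nil_append, List.mem_map, List.mem_filter]
  constructor
  · rintro ⟨q, ⟨hq, hw⟩, rfl⟩
    exact ⟨q, hq, by simpa using hw, rfl⟩
  · rintro ⟨q, hq, hw, rfl⟩
    exact ⟨q, ⟨hq, by simpa using hw⟩, rfl⟩

theorem pvMemIndexB_idx (tasks : List String) (j : Nat) (hj : j < tasks.length) (w : String) :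
    (1 + (j : Int)) ∈ (pvIndexB tasks).getD w [] ↔
      (w = PySem.Str.lower tasks[j] ∨ w = "#" ++ PySem.Int.toStr (1 + (j : Int))) := by
  rw [pvMemIndexB]
  constructor
  · rintro ⟨q, hq, hw, hi⟩
    obtain ⟨k, hk, hq'⟩ := (pvMemPairsB tasks q).mp hq
    have hkj : k = j := by
      rcases hq' with rfl | rfl <;> · simp only at hi; omega
    subst hkj
    rcases hq' with rfl | rfl
    · exact Or.inl hw.symm
    · exact Or.inr hw.symm
  · rintro (rfl | rfl)
    · exact ⟨_, (pvMemPairsB tasks _).mpr ⟨j, hj, Or.inl rfl⟩, rfl, rfl⟩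
    · exact ⟨_, (pvMemPairsB tasks _).mpr ⟨j, hj, Or.inr rfl⟩, rfl, rfl⟩

theorem pvMemLengthsB (tasks : List String) (L : Int) :
    L ∈ pvLengthsB tasks ↔ ∃ q ∈ pvPairsB tasks, PySem.Str.len q.1 = L := by
  unfold pvLengthsB pvIndexB
  rw [PySem.List.mem_sorted]
  rw [PySem.Dict.keys_foldl_modify_key (pvPairsB tasks) Prod.fst [] (fun _ q => (· ++ [q.2]))]
  simp only [PySem.Dict.keys_empty, PySem.Set.update_nil_left, PySem.Set.mem_ofList, List.mem_map]
  constructor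
  · rintro ⟨w, ⟨q, hq, rfl⟩, rfl⟩
    exact ⟨q, hq, rfl⟩
  · rintro ⟨q, hq, rfl⟩
    exact ⟨q.1, ⟨q, hq, rfl⟩, rfl⟩

theorem pvMemDoneB (tasks : List String) (msgs : List String) (i : Int) :
    i ∈ pvDoneB tasks msgs ↔ ∃ m ∈ msgs, ∃ L ∈ pvLengthsB tasks,
      L ≤ PySem.Str.len (PySem.Str.lower m) ∧
      ∃ p : Int, 0 ≤ p ∧ p < PySem.Str.len (PySem.Str.lower m) - L + 1 ∧
        i ∈ (pvIndexB tasks).getD (PySem.Str.slice (PySem.Str.lower m) (some p) (some (p + L))) [] := by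
  unfold pvDoneB
  rw [pvMemFoldGen _
      (fun m i => ∃ L ∈ pvLengthsB tasks, L ≤ PySem.Str.len (PySem.Str.lower m) ∧
        ∃ p : Int, 0 ≤ p ∧ p < PySem.Str.len (PySem.Str.lower m) - L + 1 ∧
          i ∈ (pvIndexB tasks).getD (PySem.Str.slice (PySem.Str.lower m) (some p) (some (p + L))) []) ?_]
  · simp
  intro s m x
  rw [pvMemFoldGen _
      (fun L x => L ≤ PySem.Str.len (PySem.Str.lower m) ∧
        ∃ p : Int, 0 ≤ p ∧ p < PySem.Str.len (PySem.Str.lower m) - L + 1 ∧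
          x ∈ (pvIndexB tasks).getD (PySem.Str.slice (PySem.Str.lower m) (some p) (some (p + L))) []) ?_]
  intro s' L x'
  split_ifs with hL
  · rw [pvMemFoldGen _
        (fun p x => x ∈ (pvIndexB tasks).getD (PySem.Str.slice (PySem.Str.lower m) (some p) (some (p + L))) []) ?_]
    · simp only [PySem.List.mem_pyRange_one]
      constructor
      · rintro (hs | ⟨p, ⟨h0, h1⟩, hp⟩)
        · exact Or.inl hs
        · exact Or.inr ⟨hL, p, h0, h1, hp⟩
      · rintro (hs | ⟨_, p, h0, h1, hp⟩)
        · exact Or.inl hs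
        · exact Or.inr ⟨p, ⟨h0, h1⟩, hp⟩
    · intro s'' p x''
      exact PySem.Set.mem_update _ _ _
  · constructor
    · exact Or.inl
    · rintro (hs | ⟨hL', _⟩)
      · exact hs
      · exact absurd hL' hL

-- a window of s is an infix of s
theorem pvWindowInfix (s w : String) (p L : Int) (h0 : 0 ≤ p) (hL : 0 ≤ L)
    (hw : PySem.Str.slice s (some p) (some (p + L)) = w) : w.toList <:+: s.toList := by
  subst hw
  rw [PySem.Str.toList_slice, PySem.Chars.slice_eq_listSlice]
  rw [PySem.List.slice_toNat _ h0 (by omega)]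
  exact ((List.take_prefix _ _).isInfix).trans (List.drop_suffix _ _).isInfix

-- an infix of s is a window of s
theorem pvInfixWindow (s w : String) (h : w.toList <:+: s.toList) :
    ∃ p : Int, 0 ≤ p ∧ p + PySem.Str.len w ≤ PySem.Str.len s ∧
      PySem.Str.slice s (some p) (some (p + PySem.Str.len w)) = w := by
  obtain ⟨pre, suf, hs⟩ := h
  refine ⟨(pre.length : Int), by positivity, ?_, ?_⟩
  · simp only [PySem.Str.len_eq, ← hs]
    simp [List.length_append]
  · apply String.toList_inj.mp
    rw [PySem.Str.toList_slice, PySem.Chars.slice_eq_listSlice, PySem.Str.len_eq]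
    rw [show ((pre.length : Int) + (w.toList.length : Int)) = ((pre.length + w.toList.length : Nat) : Int) by push_cast; ring]
    rw [PySem.List.slice_toNat _ (by positivity) (by positivity)]
    simp only [Int.toNat_natCast]
    rw [← hs]
    rw [Nat.add_sub_cancel_left, List.append_assoc, List.drop_left, List.take_left]

-- the two done-sets agree on every task index
theorem pvMarkEq (tasks msgs : List String) (j : Nat) (hj : j < tasks.length) :
    PySem.Set.contains
      ((PySem.List.enumerate tasks 1).foldl (fun done p =>
        if pvInnerA (PySem.Str.lower p.2) ("#" ++ PySem.Int.toStr p.1) (msgs.map PySem.Str.lower)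
        then PySem.Set.add done p.1 else done) PySem.Set.empty) (1 + (j : Int))
    = PySem.Set.contains (pvDoneB tasks msgs) (1 + (j : Int)) := by
  rw [Bool.eq_iff_iff, PySem.Set.contains_iff, PySem.Set.contains_iff, pvFoldAdd_mem, pvMemDoneB]
  constructor
  · rintro (h0 | ⟨q, hq, hcq, hxq⟩)
    · exact absurd h0 (List.not_mem_nil)
    · obtain ⟨k, hk, rfl⟩ := (PySem.List.mem_enumerate_iff _ _ _).mp hq
      obtain rfl : k = j := by simp only at hxq; omega
      simp only at hcq
      rw [pvInnerA_eq_any, List.any_map] at hcq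
      obtain ⟨m, hm, hor⟩ := List.any_eq_true.mp hcq
      simp only [Function.comp, Bool.or_eq_true] at hor
      -- w is the matched pattern; it is in pairs, so its length is in lengths
      have key : ∀ w : String,
          ((w, 1 + (k : Int)) ∈ pvPairsB tasks) →
          (w = PySem.Str.lower tasks[k] ∨ w = "#" ++ PySem.Int.toStr (1 + (k : Int))) →
          PySem.Str.isIn w (PySem.Str.lower m) = true →
          ∃ L ∈ pvLengthsB tasks, L ≤ PySem.Str.len (PySem.Str.lower m) ∧
            ∃ p : Int, 0 ≤ p ∧ p < PySem.Str.len (PySem.Str.lower m) - L + 1 ∧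
              (1 + (k : Int)) ∈ (pvIndexB tasks).getD
                (PySem.Str.slice (PySem.Str.lower m) (some p) (some (p + L))) [] := by
        intro w hwpair hwor hin
        obtain ⟨p, hp0, hple, hpw⟩ := pvInfixWindow _ _ ((PySem.Str.isIn_iff_infix _ _).mp hin)
        have hLlen : (0 : Int) ≤ PySem.Str.len w := by rw [PySem.Str.len_eq]; positivity
        refine ⟨PySem.Str.len w, (pvMemLengthsB tasks _).mpr ⟨(w, 1 + (k : Int)), hwpair, rfl⟩,
          by omega, p, hp0, by omega, ?_⟩
        rw [hpw, pvMemIndexB_idx tasks k hk]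
        exact hwor
      rcases hor with hin | hin
      · exact ⟨m, hm, key _ ((pvMemPairsB tasks _).mpr ⟨k, hk, Or.inl rfl⟩) (Or.inl rfl) hin⟩
      · exact ⟨m, hm, key _ ((pvMemPairsB tasks _).mpr ⟨k, hk, Or.inr rfl⟩) (Or.inr rfl) hin⟩
  · rintro ⟨m, hm, L, hL, hLle, p, hp0, hplt, hmem⟩
    have hL0 : (0 : Int) ≤ L := by
      obtain ⟨q, _, rfl⟩ := (pvMemLengthsB tasks L).mp hL
      rw [PySem.Str.len_eq]; positivity
    rw [pvMemIndexB_idx tasks j hj] at hmem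
    refine Or.inr ⟨(1 + (j : Int), tasks[j]),
      (PySem.List.mem_enumerate_iff _ _ _).mpr ⟨j, hj, rfl⟩, ?_, rfl⟩
    simp only
    rw [pvInnerA_eq_any, List.any_map]
    refine List.any_eq_true.mpr ⟨m, hm, ?_⟩
    simp only [Function.comp, Bool.or_eq_true]
    rcases hmem with hw | hw
    · exact Or.inl ((PySem.Str.isIn_iff_infix _ _).mpr
        (pvWindowInfix _ _ p L hp0 hL0 (by rw [← hw])))
    · exact Or.inr ((PySem.Str.isIn_iff_infix _ _).mpr
        (pvWindowInfix _ _ p L hp0 hL0 (by rw [← hw])))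

-- ===== VERDICT (by name: the statement is the Claim_ definition above) =====
theorem build_checklist_spec : Claim_equal_build_checklist := by
  intro tasks msgs _
  show build_checklist tasks msgs = build_checklist_alt tasks msgs
  unfold build_checklist build_checklist_alt
  simp only [PySem.List.foldl_append_singleton_eq_map]
  congr 1
  congr 1
  apply List.map_congr_left
  intro q hq
  obtain ⟨k, hk, rfl⟩ := (PySem.List.mem_enumerate_iff _ _ _).mp hq
  simp only
  rw [pvMarkEq tasks msgs k hk]
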